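-- pv_equiv track=rewrite | github.com/brandoneng000/LeetCode | medium/2513.py | minimizeSet
-- ===== SOURCE A (Python) =====
-- from math import lcm
--
-- def minimizeSet(divisor1: int, divisor2: int, uniqueCnt1: int, uniqueCnt2: int) -> int:
--     left, right, g = 0, 10 ** 10, lcm(divisor1, divisor2)
--
--     while left < right:
--         middle = (left + right) // 2
--
--         x = middle - middle // divisor1 >= uniqueCnt1
--         y = middle - middle // divisor2 >= uniqueCnt2
--         z = middle - middle // g >= uniqueCnt1 + uniqueCnt2
--
--         if x and y and z:
--             right = middle
--         else:
--             left = middle + 1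
--
--     return left
-- ===== SOURCE B (Python) =====
-- from math import lcm
--
-- def minimizeSet(divisor1: int, divisor2: int, uniqueCnt1: int, uniqueCnt2: int) -> int:
--     # Closed form: the u-th positive integer not divisible by d is u + (u-1)//(d-1),
--     # i.e. the smallest n with n - n//d >= u; take the max over the three constraints.
--     def solve(d: int, u: int) -> int:
--         return 0 if u <= 0 else u + (u - 1) // (d - 1)
--
--     g = lcm(divisor1, divisor2)
--     return max(solve(divisor1, uniqueCnt1),
--                solve(divisor2, uniqueCnt2),
--                solve(g, uniqueCnt1 + uniqueCnt2))
-- ===== Notes on version B (the rewrite author's own statement) =====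
-- stated objective: alternative
-- what changed: Replaces the binary search over [0, 10^10] by a closed-form inversion of the monotone map n -> n - n//d for each of the three divisibility constraints (u-th non-multiple of d is u + (u-1)//(d-1)), returning the maximum of the three per-constraint minimal bounds; Pre_ excludes zero divisors (A raises) and the unsatisfiable unit-divisor counts where A returns its 10^10 search cap while B's formula divides by d-1 = 0 and raises.
-- outside the precondition, e.g. on minimizeSet(0, 3, 1, 1): A raises ZeroDivisionError, B returns 1; on minimizeSet(1, 3, 1, 1): A returns 10000000000, B raises ZeroDivisionError; on minimizeSet(-1, -1, 1, 1): A returns 10000000000, B raises ZeroDivisionError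
import Mathlib
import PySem

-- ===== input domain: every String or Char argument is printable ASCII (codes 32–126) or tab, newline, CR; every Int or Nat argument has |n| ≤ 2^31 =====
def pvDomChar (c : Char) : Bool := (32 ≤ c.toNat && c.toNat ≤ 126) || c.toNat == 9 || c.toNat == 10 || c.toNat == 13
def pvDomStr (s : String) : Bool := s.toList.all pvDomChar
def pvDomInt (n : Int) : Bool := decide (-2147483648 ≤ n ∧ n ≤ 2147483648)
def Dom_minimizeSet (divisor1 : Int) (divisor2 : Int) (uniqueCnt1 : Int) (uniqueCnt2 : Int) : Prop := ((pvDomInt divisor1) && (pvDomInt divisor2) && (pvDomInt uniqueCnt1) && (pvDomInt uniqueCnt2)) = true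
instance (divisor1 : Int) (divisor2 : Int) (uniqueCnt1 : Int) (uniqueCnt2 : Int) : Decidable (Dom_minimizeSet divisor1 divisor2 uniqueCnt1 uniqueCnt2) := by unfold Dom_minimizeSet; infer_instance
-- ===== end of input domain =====

-- B replaces A's binary search over [0, 10^10] by a closed-form inversion of the monotone
-- map n ↦ n - n//d for each of the three constraints, returning the max of the three bounds.

-- ===== PORT A =====
-- midpoint bounds, cited by the loop's decreasing_by
theorem pvMidBounds (l r : Int) (h : l < r) :
    l ≤ PySem.Int.floordiv (l + r) 2 ∧ PySem.Int.floordiv (l + r) 2 < r :=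
  ⟨(PySem.Int.le_floordiv_iff_mul_le (by norm_num)).mpr (by linarith),
   (PySem.Int.floordiv_lt_iff_lt_mul (by norm_num)).mpr (by linarith)⟩

-- the while-loop of A: state (left, right); returns left when left < right fails
def minimizeSetLoop (divisor1 divisor2 g uniqueCnt1 uniqueCnt2 left right : Int) : Int :=
  if _h : left < right then
    let middle := PySem.Int.floordiv (left + right) 2
    if uniqueCnt1 ≤ middle - PySem.Int.floordiv middle divisor1 ∧
       uniqueCnt2 ≤ middle - PySem.Int.floordiv middle divisor2 ∧
       uniqueCnt1 + uniqueCnt2 ≤ middle - PySem.Int.floordiv middle g then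
      minimizeSetLoop divisor1 divisor2 g uniqueCnt1 uniqueCnt2 left middle
    else
      minimizeSetLoop divisor1 divisor2 g uniqueCnt1 uniqueCnt2 (middle + 1) right
  else left
termination_by (right - left).toNat
decreasing_by
  · have := pvMidBounds left right _h; omega
  · have := pvMidBounds left right _h; omega

def minimizeSet (divisor1 : Int) (divisor2 : Int) (uniqueCnt1 : Int) (uniqueCnt2 : Int) : Int :=
  minimizeSetLoop divisor1 divisor2 (Int.lcm divisor1 divisor2) uniqueCnt1 uniqueCnt2 0 (10 ^ 10)

-- ===== PORT B =====
-- smallest n ≥ 0 with n - n//d ≥ u (the u-th positive integer not divisible by d)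
def solveAlt (d u : Int) : Int :=
  if u ≤ 0 then 0 else u + PySem.Int.floordiv (u - 1) (d - 1)

def minimizeSet_alt (divisor1 : Int) (divisor2 : Int) (uniqueCnt1 : Int) (uniqueCnt2 : Int) : Int :=
  let g : Int := Int.lcm divisor1 divisor2
  max (max (solveAlt divisor1 uniqueCnt1) (solveAlt divisor2 uniqueCnt2))
      (solveAlt g (uniqueCnt1 + uniqueCnt2))

-- ===== PRECONDITION & SPEC =====
-- Pre_ excludes divisors 0 (A raises ZeroDivisionError) and the inputs whose required count of
-- non-multiples is unsatisfiable (divisor 1 with a positive count, or lcm 1 with positive total),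
-- where A returns its 10^10 search cap and B's closed form raises ZeroDivisionError.
def Pre_minimizeSet (divisor1 : Int) (divisor2 : Int) (uniqueCnt1 : Int) (uniqueCnt2 : Int) : Prop :=
  divisor1 ≠ 0 ∧ divisor2 ≠ 0 ∧
  (divisor1 = 1 → uniqueCnt1 ≤ 0) ∧ (divisor2 = 1 → uniqueCnt2 ≤ 0) ∧
  ((divisor1 = 1 ∨ divisor1 = -1) ∧ (divisor2 = 1 ∨ divisor2 = -1) → uniqueCnt1 + uniqueCnt2 ≤ 0)
instance (divisor1 : Int) (divisor2 : Int) (uniqueCnt1 : Int) (uniqueCnt2 : Int) : Decidable (Pre_minimizeSet divisor1 divisor2 uniqueCnt1 uniqueCnt2) := by unfold Pre_minimizeSet; infer_instance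

def pvWitness_minimizeSet : Int × Int × Int × Int := (2, 3, 5, 7)

def Spec_minimizeSet (divisor1 : Int) (divisor2 : Int) (uniqueCnt1 : Int) (uniqueCnt2 : Int) (out : Int) : Prop := out = minimizeSet_alt divisor1 divisor2 uniqueCnt1 uniqueCnt2
instance (divisor1 : Int) (divisor2 : Int) (uniqueCnt1 : Int) (uniqueCnt2 : Int) (out : Int) : Decidable (Spec_minimizeSet divisor1 divisor2 uniqueCnt1 uniqueCnt2 out) := by unfold Spec_minimizeSet; infer_instance

-- ===== CLAIM (what is proved, stated in full; the proofs are below) =====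
def Claim_equal_minimizeSet : Prop := ∀ (divisor1 : Int) (divisor2 : Int) (uniqueCnt1 : Int) (uniqueCnt2 : Int), Dom_minimizeSet divisor1 divisor2 uniqueCnt1 uniqueCnt2 → Pre_minimizeSet divisor1 divisor2 uniqueCnt1 uniqueCnt2 → Spec_minimizeSet divisor1 divisor2 uniqueCnt1 uniqueCnt2 (minimizeSet divisor1 divisor2 uniqueCnt1 uniqueCnt2)

-- ===== LEMMAS AND PROOFS =====

-- the loop's test, as a predicate of the probed midpoint
abbrev pvCond (divisor1 divisor2 g uniqueCnt1 uniqueCnt2 n : Int) : Prop :=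
  uniqueCnt1 ≤ n - PySem.Int.floordiv n divisor1 ∧
  uniqueCnt2 ≤ n - PySem.Int.floordiv n divisor2 ∧
  uniqueCnt1 + uniqueCnt2 ≤ n - PySem.Int.floordiv n g

-- for d ≤ -1 the single closed form rewrites to a positive-divisor floordiv
theorem solveAlt_neg_eq (d u : Int) (hd : d ≤ -1) (hu : 1 ≤ u) :
    u + PySem.Int.floordiv (u - 1) (d - 1) = PySem.Int.floordiv (u * -d + 1) (-d + 1) := by
  have e := PySem.Int.floordiv_neg_neg (u - 1) (d - 1)
  rw [← e]
  have hb : (0:Int) < -(d - 1) := by omega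
  set s := PySem.Int.floordiv (-(u - 1)) (-(d - 1)) with hs
  obtain ⟨hs1, hs2⟩ := (PySem.Int.floordiv_eq_iff_of_pos hb).mp hs.symm
  symm
  rw [PySem.Int.floordiv_eq_iff_of_pos (show (0:Int) < -d + 1 by omega)]
  constructor <;> nlinarith

theorem solveAlt_nonneg (d u : Int) (hd0 : d ≠ 0) (hd1 : d = 1 → u ≤ 0) : 0 ≤ solveAlt d u := by
  unfold solveAlt
  split_ifs with h1
  · exact le_refl 0
  · have h1' : 1 ≤ u := by omega
    rcases lt_or_gt_of_ne hd0 with hneg | hpos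
    · rw [solveAlt_neg_eq d u (by omega) h1']
      exact (PySem.Int.le_floordiv_iff_mul_le (by omega)).mpr (by nlinarith)
    · have hd2 : 2 ≤ d := by by_contra h; push_neg at h; interval_cases d <;> omega
      have : 0 ≤ PySem.Int.floordiv (u - 1) (d - 1) :=
        (PySem.Int.le_floordiv_iff_mul_le (by omega)).mpr (by nlinarith)
      omega

theorem solveAlt_le (d u B : Int) (hd0 : d ≠ 0) (hd1 : d = 1 → u ≤ 0) (hB : 0 ≤ B) (hu : u ≤ B) :
    solveAlt d u ≤ 2 * B := by
  unfold solveAlt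
  split_ifs with h1
  · omega
  · have h1' : 1 ≤ u := by omega
    rcases lt_or_gt_of_ne hd0 with hneg | hpos
    · rw [solveAlt_neg_eq d u (by omega) h1']
      have hm : 1 ≤ -d := by omega
      have : PySem.Int.floordiv (u * -d + 1) (-d + 1) < u + 1 :=
        (PySem.Int.floordiv_lt_iff_lt_mul (by omega)).mpr (by nlinarith)
      omega
    · have hd2 : 2 ≤ d := by by_contra h; push_neg at h; interval_cases d <;> omega
      have : PySem.Int.floordiv (u - 1) (d - 1) < u :=
        (PySem.Int.floordiv_lt_iff_lt_mul (by omega)).mpr (by nlinarith)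
      omega

-- the key inversion: for n ≥ 0, d ≠ 0 (and not d = 1 with u > 0),
-- solveAlt d u ≤ n ↔ u ≤ n - n//d
theorem solveAlt_le_iff (d u n : Int) (hd0 : d ≠ 0) (hd1 : d = 1 → u ≤ 0) (hn : 0 ≤ n) :
    solveAlt d u ≤ n ↔ u ≤ n - PySem.Int.floordiv n d := by
  unfold solveAlt
  split_ifs with h1
  · -- u ≤ 0 : both sides hold
    have hfd : PySem.Int.floordiv n d ≤ n := by
      rcases lt_or_gt_of_ne hd0 with hneg | hpos
      · have e := PySem.Int.floordiv_neg_neg (-n) (-d)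
        simp only [neg_neg] at e
        have : PySem.Int.floordiv (-n) (-d) < 1 :=
          (PySem.Int.floordiv_lt_iff_lt_mul (by omega)).mpr (by omega)
        omega
      · have : PySem.Int.floordiv n d < n + 1 :=
          (PySem.Int.floordiv_lt_iff_lt_mul hpos).mpr (by nlinarith)
        omega
    exact iff_of_true hn (by omega)
  · have h1' : 1 ≤ u := by omega
    rcases lt_or_gt_of_ne hd0 with hneg | hpos
    · -- d ≤ -1
      rw [solveAlt_neg_eq d u (by omega) h1']
      have hm : 1 ≤ -d := by omega
      set s := PySem.Int.floordiv (u * -d + 1) (-d + 1) with hs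
      obtain ⟨hs1, hs2⟩ := (PySem.Int.floordiv_eq_iff_of_pos (show (0:Int) < -d + 1 by omega)).mp hs.symm
      have e := PySem.Int.floordiv_neg_neg (-n) (-d)
      simp only [neg_neg] at e
      rw [e]
      set q := PySem.Int.floordiv (-n) (-d) with hq
      obtain ⟨hq1, hq2⟩ := (PySem.Int.floordiv_eq_iff_of_pos (show (0:Int) < -d by omega)).mp hq.symm
      have key1 : s ≤ n ↔ (u - 1) * -d + 1 ≤ n * (-d + 1) := by
        have hX : (u - 1) * -d + 1 ≤ s * (-d + 1) := by nlinarith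
        constructor
        · intro hh; nlinarith
        · intro hh; by_contra hc; push_neg at hc; nlinarith
      have key2 : u ≤ n - q ↔ (u - 1) * -d + 1 ≤ n * (-d + 1) := by
        have hr0 : 0 ≤ -n - q * -d := by linarith
        have hr1 : -n - q * -d < -d := by linarith
        constructor
        · intro hh; nlinarith
        · intro hh; by_contra hc; push_neg at hc; nlinarith
      rw [key1, key2]
    · -- 2 ≤ d
      have hd2 : 2 ≤ d := by by_contra h; push_neg at h; interval_cases d <;> omega
      set s := PySem.Int.floordiv (u - 1) (d - 1) with hs
      set q := PySem.Int.floordiv n d with hq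
      obtain ⟨hs1, hs2⟩ := (PySem.Int.floordiv_eq_iff_of_pos (show (0:Int) < d - 1 by omega)).mp hs.symm
      obtain ⟨hq1, hq2⟩ := (PySem.Int.floordiv_eq_iff_of_pos (show (0:Int) < d by omega)).mp hq.symm
      rcases lt_trichotomy q s with h | h | h
      · have hstep : (q + 1) * (d - 1) ≤ s * (d - 1) := by nlinarith
        have hqd : (q + 1) * d ≤ u + q := by nlinarith
        exact iff_of_false (by linarith) (by linarith)
      · constructor <;> intro hh <;> linarith
      · have hstep : (s + 1) * (d - 1) ≤ q * (d - 1) := by nlinarith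
        have hqd : u + q ≤ q * d := by nlinarith
        exact iff_of_true (by linarith) (by linarith)

-- binary-search correctness: the loop returns the unique x with "no hit below x, hit at x (if x < r)"
theorem loop_eq_target (d1 d2 g u1 u2 x : Int)
    (hmono : ∀ a b : Int, 0 ≤ a → a ≤ b → pvCond d1 d2 g u1 u2 a → pvCond d1 d2 g u1 u2 b) :
    ∀ k (l r : Int), (r - l).toNat ≤ k → 0 ≤ l → l ≤ x → x ≤ r →
    (∀ n, l ≤ n → n < x → ¬ pvCond d1 d2 g u1 u2 n) →
    (x < r → pvCond d1 d2 g u1 u2 x) →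
    minimizeSetLoop d1 d2 g u1 u2 l r = x := by
  intro k
  induction k with
  | zero =>
    intro l r hk h0 hlx hxr _ _
    have hrl : ¬ l < r := by omega
    rw [minimizeSetLoop, dif_neg hrl]
    omega
  | succ k ih =>
    intro l r hk h0 hlx hxr hbelow hhit
    by_cases hlr : l < r
    · obtain ⟨hml, hmr⟩ := pvMidBounds l r hlr
      rw [minimizeSetLoop, dif_pos hlr]
      set m := PySem.Int.floordiv (l + r) 2 with hm
      by_cases hc : pvCond d1 d2 g u1 u2 m
      · rw [if_pos hc]
        have hxm : x ≤ m := by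
          by_contra h; push_neg at h
          exact hbelow m hml h hc
        exact ih l m (by omega) h0 hlx hxm hbelow (fun h => hhit (by omega))
      · rw [if_neg hc]
        have hmx : m + 1 ≤ x := by
          by_contra h; push_neg at h
          have hxr' : x < r := by omega
          exact hc (hmono x m (by omega) (by omega) (hhit hxr'))
        exact ih (m + 1) r (by omega) (by omega) hmx hxr
          (fun n hn hnx => hbelow n (by omega) hnx) hhit
    · rw [minimizeSetLoop, dif_neg hlr]
      omega

theorem pvLcm_facts (d1 d2 : Int) (hd1 : d1 ≠ 0) (hd2 : d2 ≠ 0) :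
    (Int.lcm d1 d2 : Int) ≠ 0 ∧
    ((Int.lcm d1 d2 : Int) = 1 → (d1 = 1 ∨ d1 = -1) ∧ (d2 = 1 ∨ d2 = -1)) := by
  constructor
  · have h1 : d1.natAbs ≠ 0 := by simpa using hd1
    have h2 : d2.natAbs ≠ 0 := by simpa using hd2
    have : Int.lcm d1 d2 ≠ 0 := by
      unfold Int.lcm
      exact Nat.lcm_ne_zero h1 h2
    exact_mod_cast this
  · intro h
    have hl : Int.lcm d1 d2 = 1 := by exact_mod_cast h
    have e1 : d1.natAbs ∣ Int.lcm d1 d2 := Nat.dvd_lcm_left _ _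
    have e2 : d2.natAbs ∣ Int.lcm d1 d2 := Nat.dvd_lcm_right _ _
    rw [hl] at e1 e2
    have n1 : d1.natAbs = 1 := Nat.dvd_one.mp e1
    have n2 : d2.natAbs = 1 := Nat.dvd_one.mp e2
    constructor
    · exact Int.natAbs_eq_iff.mp n1
    · exact Int.natAbs_eq_iff.mp n2

-- ===== VERDICT (by name: the statement is the Claim_ definition above) =====
theorem minimizeSet_spec : Claim_equal_minimizeSet := by
  unfold Claim_equal_minimizeSet
  intro d1 d2 u1 u2 hdom hpre
  obtain ⟨hd1, hd2, h11, h21, hpm⟩ := hpre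
  unfold Spec_minimizeSet minimizeSet minimizeSet_alt
  simp only [Dom_minimizeSet, pvDomInt, Bool.and_eq_true, decide_eq_true_eq] at hdom
  obtain ⟨⟨⟨_, _⟩, hu1b⟩, hu2b⟩ := hdom
  obtain ⟨hg0, hg1⟩ := pvLcm_facts d1 d2 hd1 hd2
  set g : Int := (Int.lcm d1 d2 : Int) with hgdef
  have hgu : g = 1 → u1 + u2 ≤ 0 := fun h => hpm (hg1 h)
  set x := max (max (solveAlt d1 u1) (solveAlt d2 u2)) (solveAlt g (u1 + u2)) with hx
  have hchar : ∀ n : Int, 0 ≤ n → (pvCond d1 d2 g u1 u2 n ↔ x ≤ n) := by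
    intro n hn
    have e1 := solveAlt_le_iff d1 u1 n hd1 h11 hn
    have e2 := solveAlt_le_iff d2 u2 n hd2 h21 hn
    have e3 := solveAlt_le_iff g (u1 + u2) n hg0 hgu hn
    rw [hx]
    constructor
    · rintro ⟨c1, c2, c3⟩
      exact max_le (max_le (e1.mpr c1) (e2.mpr c2)) (e3.mpr c3)
    · intro hle
      simp only [max_le_iff] at hle
      exact ⟨e1.mp hle.1.1, e2.mp hle.1.2, e3.mp hle.2⟩
  have hx0 : 0 ≤ x := le_trans (solveAlt_nonneg d1 u1 hd1 h11)
    (le_trans (le_max_left _ _) (le_max_left _ _))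
  have hxcap : x ≤ 10 ^ 10 := by
    have b1 := solveAlt_le d1 u1 (2 ^ 31) hd1 h11 (by norm_num) (by omega)
    have b2 := solveAlt_le d2 u2 (2 ^ 31) hd2 h21 (by norm_num) (by omega)
    have b3 := solveAlt_le g (u1 + u2) (2 ^ 32) hg0 hgu (by norm_num) (by omega)
    have : x ≤ 2 ^ 33 := max_le (max_le (by omega) (by omega)) (by omega)
    omega
  refine loop_eq_target d1 d2 g u1 u2 x ?_ (10 ^ 10) 0 (10 ^ 10) (by norm_num) le_rfl hx0 hxcap ?_ ?_
  · intro a b ha hab hca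
    exact (hchar b (le_trans ha hab)).mpr (le_trans ((hchar a ha).mp hca) hab)
  · intro n hn hnx hcn
    have := (hchar n hn).mp hcn
    omega
  · intro _
    exact (hchar x hx0).mpr le_rfl
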